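-- pv_equiv track=rewrite | github.com/smathog/Hyperskill-Projects | Python Projects/Duplicate File Handler (Medium)/Stage 4/handler.py | sort_files_by_bytes
-- ===== SOURCE A (Python) =====
-- from typing import (Tuple, List, Set, Dict)
--
-- def sort_files_by_bytes(files: List[Tuple[str, int]]) -> List[Tuple[List[str], int]]:
--     """
--
--     :param files: A list of items of the form item = (file_path, file_size_in_bytes),
--         sorted on the second field of the tuple
--     :return: A list of tuples, each containing a int size and a list of files of that size
--     """
--
--     file_list = []
--     for (file_path, size) in files:
--         if file_list:
--             last_size = file_list[-1][1]
--             if last_size == size: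
--                 file_list[-1][0].append(file_path)
--                 continue
--         file_list.append(([file_path], size))
--     return file_list
-- ===== SOURCE B (Python) =====
-- def _fuse(left, right):
--     """Concatenate two grouped lists, fusing the boundary groups if same size."""
--     if left and right and left[-1][1] == right[0][1]:
--         fused = (left[-1][0] + right[0][0], left[-1][1])
--         return left[:-1] + [fused] + right[1:]
--     return left + right
--
--
-- def sort_files_by_bytes(files):
--     """Divide and conquer: split the list in half, group each half recursively,
--     then stitch the halves, fusing the boundary groups when they share a size."""
--     if len(files) <= 1:
--         return [([path], size) for path, size in files]
--     mid = len(files) // 2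
--     return _fuse(sort_files_by_bytes(files[:mid]), sort_files_by_bytes(files[mid:]))
-- ===== Notes on version B (the rewrite author's own statement) =====
-- stated objective: alternative
-- what changed: Replaces the linear left-to-right scan that mutates the last emitted group by a divide-and-conquer: recursively group each half of the list and fuse the two boundary groups when they share a size.
import Mathlib
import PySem

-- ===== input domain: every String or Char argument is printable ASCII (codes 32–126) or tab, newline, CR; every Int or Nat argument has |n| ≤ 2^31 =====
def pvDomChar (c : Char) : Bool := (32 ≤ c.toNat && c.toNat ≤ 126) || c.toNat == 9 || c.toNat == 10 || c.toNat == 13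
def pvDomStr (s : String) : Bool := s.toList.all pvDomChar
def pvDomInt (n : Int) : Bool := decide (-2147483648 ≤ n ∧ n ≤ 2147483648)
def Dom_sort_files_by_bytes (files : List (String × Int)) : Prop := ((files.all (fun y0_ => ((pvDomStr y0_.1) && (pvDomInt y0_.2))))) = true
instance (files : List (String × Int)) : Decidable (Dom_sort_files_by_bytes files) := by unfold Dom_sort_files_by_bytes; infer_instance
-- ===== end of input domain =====

-- B replaces A's linear scan that mutates the last emitted group by a divide-and-conquer:
-- group each half recursively, then fuse the boundary groups when they share a size (alternative decomposition, same result).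

-- ===== PORT A =====
-- A: fold over files; if the accumulated list is nonempty and its last group has
-- the same size, append the path into that last group, else append a fresh group.
def sort_files_by_bytes (files : List (String × Int)) : List (List String × Int) :=
  files.foldl (fun file_list f =>
    match file_list.getLast? with
    | some last =>
        if last.2 = f.2 then
          file_list.dropLast ++ [(last.1 ++ [f.1], last.2)]   -- file_list[-1][0].append(file_path)
        else
          file_list ++ [([f.1], f.2)]
    | none => file_list ++ [([f.1], f.2)]) []

-- ===== PORT B =====
-- _fuse: concatenate two grouped lists, fusing the boundary groups if same size
-- (left[-1] / right[0] peeks rendered by the getLast? / cons match; both in range exactly when the branch fires)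
def pvFuse (left right : List (List String × Int)) : List (List String × Int) :=
  match left.getLast?, right with
  | some lg, r0 :: rtl =>
      if lg.2 = r0.2 then
        left.dropLast ++ [(lg.1 ++ r0.1, lg.2)] ++ rtl   -- left[:-1] + [fused] + right[1:]
      else left ++ right
  | _, _ => left ++ right

def sort_files_by_bytes_alt (files : List (String × Int)) : List (List String × Int) :=
  if _h : (files.length : Int) ≤ 1 then
    files.map (fun f => ([f.1], f.2))
  else
    let mid : Int := PySem.Int.floordiv (files.length : Int) 2
    pvFuse (sort_files_by_bytes_alt (PySem.List.slice files none (some mid)))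
           (sort_files_by_bytes_alt (PySem.List.slice files (some mid) none))
termination_by files.length
decreasing_by
  · have hm : PySem.Int.floordiv ((files.length : Nat) : Int) 2 = ((files.length / 2 : Nat) : Int) := by
      exact_mod_cast PySem.Int.floordiv_natCast files.length 2
    rw [hm, PySem.List.slice_to_natCast]
    simp only [List.length_take]
    omega
  · have hm : PySem.Int.floordiv ((files.length : Nat) : Int) 2 = ((files.length / 2 : Nat) : Int) := by
      exact_mod_cast PySem.Int.floordiv_natCast files.length 2
    rw [hm, PySem.List.slice_from_natCast]
    simp only [List.length_drop]
    omega

-- ===== PRECONDITION & SPEC =====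
def Spec_sort_files_by_bytes (files : List (String × Int)) (out : List (List String × Int)) : Prop := out = sort_files_by_bytes_alt files
instance (files : List (String × Int)) (out : List (List String × Int)) : Decidable (Spec_sort_files_by_bytes files out) := by unfold Spec_sort_files_by_bytes; infer_instance

-- ===== CLAIM (what is proved, stated in full; the proofs are below) =====
def Claim_equal_sort_files_by_bytes : Prop := ∀ (files : List (String × Int)), Dom_sort_files_by_bytes files → Spec_sort_files_by_bytes files (sort_files_by_bytes files)

-- ===== LEMMAS AND PROOFS =====

-- A's loop body, named for the lemmas
def pvStepA (file_list : List (List String × Int)) (f : String × Int) : List (List String × Int) :=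
  match file_list.getLast? with
  | some last =>
      if last.2 = f.2 then
        file_list.dropLast ++ [(last.1 ++ [f.1], last.2)]
      else file_list ++ [([f.1], f.2)]
  | none => file_list ++ [([f.1], f.2)]

theorem pvFuse_nil_right (L : List (List String × Int)) : pvFuse L [] = L := by
  unfold pvFuse
  cases L.getLast? <;> simp

theorem pvStepA_eq_fuse (acc : List (List String × Int)) (f : String × Int) :
    pvStepA acc f = pvFuse acc [([f.1], f.2)] := by
  unfold pvStepA pvFuse
  cases acc.getLast? with
  | none => simp
  | some lg => by_cases h : lg.2 = f.2 <;> simp [h]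

-- associativity of pvFuse with a singleton middle
theorem pvFuse_assoc_single (L : List (List String × Int)) (x : List String × Int)
    (R : List (List String × Int)) :
    pvFuse (pvFuse L [x]) R = pvFuse L (pvFuse [x] R) := by
  rcases List.eq_nil_or_concat L with hL | ⟨L', lg, hL⟩
  · subst hL
    simp [pvFuse]
  · subst hL
    cases R with
    | nil => rw [pvFuse_nil_right, pvFuse_nil_right]
    | cons r0 rtl =>
        by_cases h1 : lg.2 = x.2
        · by_cases h2 : x.2 = r0.2
          · have h3 : lg.2 = r0.2 := h1.trans h2
            simp [pvFuse, h1, h2]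
          · have h3 : ¬ lg.2 = r0.2 := by rw [h1]; exact h2
            simp [pvFuse, h1, h2]
        · by_cases h2 : x.2 = r0.2
          · have h3 : ¬ lg.2 = r0.2 := h2 ▸ h1
            simp [pvFuse, h2, h3]
          · simp [pvFuse, h1, h2]

-- A's fold from any accumulator = fuse of the accumulator with the fold from []
theorem pvFoldA_fuse (ys : List (String × Int)) :
    ∀ acc : List (List String × Int), ys.foldl pvStepA acc = pvFuse acc (ys.foldl pvStepA []) := by
  induction ys with
  | nil => intro acc; simp only [List.foldl_nil]; rw [pvFuse_nil_right]
  | cons f ys ih =>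
      intro acc
      simp only [List.foldl_cons]
      rw [ih (pvStepA acc f), ih (pvStepA [] f), pvStepA_eq_fuse acc f, pvStepA_eq_fuse [] f]
      rw [show pvFuse [] [([f.1], f.2)] = [([f.1], f.2)] from by simp [pvFuse]]
      exact pvFuse_assoc_single acc ([f.1], f.2) (ys.foldl pvStepA [])

theorem pvA_eq_foldStep (files : List (String × Int)) :
    sort_files_by_bytes files = files.foldl pvStepA [] := rfl

-- ===== VERDICT (by name: the statement is the Claim_ definition above) =====
theorem pvAB_eq (files : List (String × Int)) :
    sort_files_by_bytes files = sort_files_by_bytes_alt files := by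
  induction hn : files.length using Nat.strong_induction_on generalizing files with
  | _ n ih =>
    subst hn
    rw [sort_files_by_bytes_alt]
    by_cases h : (files.length : Int) ≤ 1
    · rw [dif_pos h]
      match files, h with
      | [], _ => rfl
      | [f], _ => rfl
      | f :: g :: t, h => simp at h; omega
    · rw [dif_neg h]
      have hm : PySem.Int.floordiv ((files.length : Nat) : Int) 2 = ((files.length / 2 : Nat) : Int) := by
        exact_mod_cast PySem.Int.floordiv_natCast files.length 2
      simp only [hm, PySem.List.slice_to_natCast, PySem.List.slice_from_natCast]
      have h2 : 2 ≤ files.length := by exact_mod_cast not_le.mp h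
      have hlt1 : (files.take (files.length / 2)).length < files.length := by
        simp only [List.length_take]; omega
      have hlt2 : (files.drop (files.length / 2)).length < files.length := by
        simp only [List.length_drop]; omega
      rw [← ih _ hlt1 _ rfl, ← ih _ hlt2 _ rfl]
      rw [pvA_eq_foldStep, pvA_eq_foldStep, pvA_eq_foldStep]
      conv_lhs => rw [← List.take_append_drop (files.length / 2) files]
      rw [List.foldl_append]
      exact pvFoldA_fuse (files.drop (files.length / 2)) _

theorem sort_files_by_bytes_spec : Claim_equal_sort_files_by_bytes := by
  intro files _
  exact pvAB_eq files
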